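-- pv_equiv track=rewrite | github.com/rvendler/mixtape | main.py | clean_lyrics
-- ===== SOURCE A (Python) =====
-- def clean_lyrics(lyrics_text):
--     """
--     Cleans a string of lyrics by trimming whitespace, removing metadata lines,
--     and collapsing multiple empty lines into a single empty line.
--     """
--     # 1) Trim whitespace from the start and end of the entire string
--     trimmed_text = lyrics_text.strip()
--     lines = trimmed_text.split('\n')
--     cleaned_lines = []
--
--     for line in lines:
--         # Also trim each individual line
--         stripped_line = line.strip()
--
--         # Skip lines that start with [ or ( (e.g., [Chorus])
--         if stripped_line.startswith('['): # or stripped_line.startswith('('):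
--             continue
--
--         # 2) Reduce contiguous empty lines to a single empty line
--         if not stripped_line:
--             # Only add an empty line if the last line wasn't also empty
--             if cleaned_lines and cleaned_lines[-1] == "":
--                 continue
--             else:
--                 cleaned_lines.append("")
--         else:
--             # It's a content line, so add the stripped version
--             cleaned_lines.append(stripped_line)
--
--     return '\n'.join(cleaned_lines)
-- ===== SOURCE B (Python) =====
-- def clean_lyrics(lyrics_text):
--     # Pass 1: strip every line and drop metadata ([...]) lines.
--     filtered = [s for line in lyrics_text.strip().split('\n')
--                 if not (s := line.strip()).startswith('[')]
--     # Pass 2: collapse each run of empty lines into a single empty line.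
--     out = []
--     i = 0
--     n = len(filtered)
--     while i < n:
--         if filtered[i] == '':
--             out.append('')
--             while i < n and filtered[i] == '':
--                 i += 1
--         else:
--             out.append(filtered[i])
--             i += 1
--     return '\n'.join(out)
-- ===== Notes on version B (the rewrite author's own statement) =====
-- stated objective: idiomatic
-- what changed: Replaces A's single stateful loop (which checks the accumulator's last element) by two separate passes: a filter/strip comprehension followed by a run-collapsing scan over the filtered list.
import Mathlib
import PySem

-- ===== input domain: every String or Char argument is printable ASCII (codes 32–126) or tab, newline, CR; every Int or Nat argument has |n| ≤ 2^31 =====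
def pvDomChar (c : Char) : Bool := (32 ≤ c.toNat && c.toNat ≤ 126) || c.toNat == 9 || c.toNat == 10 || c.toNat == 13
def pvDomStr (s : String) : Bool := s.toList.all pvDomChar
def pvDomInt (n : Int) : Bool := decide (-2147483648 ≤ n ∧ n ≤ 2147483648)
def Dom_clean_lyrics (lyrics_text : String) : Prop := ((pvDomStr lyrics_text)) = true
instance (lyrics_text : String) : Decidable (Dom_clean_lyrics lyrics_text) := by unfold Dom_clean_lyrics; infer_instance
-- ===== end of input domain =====

-- B replaces A's single stateful loop by two passes (filter/strip, then collapse blank runs); same output, no speed claim.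

-- ===== PORT A =====
-- the body of A's for-loop (one fold step)
def pvStepA (acc : List String) (line : String) : List String :=
  if PySem.Str.startswith (PySem.Str.strip line) "[" then acc
  else if PySem.Str.strip line = "" then
    if acc.getLast? = some "" then acc else acc ++ [""]
  else acc ++ [PySem.Str.strip line]

def clean_lyrics (lyrics_text : String) : String :=
  let trimmed_text := PySem.Str.strip lyrics_text
  let lines := (PySem.Str.split? trimmed_text "\n").getD []
  let cleaned_lines := lines.foldl pvStepA []
  PySem.Str.join "\n" cleaned_lines

-- ===== PORT B =====
-- transcription of Source B's pass-2 index loop: consuming the list = advancing i;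
-- the inner `while … == ''` loop is the dropWhile.
def pvCollapse : List String → List String
  | [] => []
  | x :: rest =>
    if x = "" then "" :: pvCollapse (rest.dropWhile (· = ""))
    else x :: pvCollapse rest
termination_by l => l.length
decreasing_by
  · exact Nat.lt_succ_of_le (List.length_dropWhile_le _ _)
  · simp

def clean_lyrics_alt (lyrics_text : String) : String :=
  let filtered := (((PySem.Str.split? (PySem.Str.strip lyrics_text) "\n").getD []).map PySem.Str.strip).filter
      (fun s => !(PySem.Str.startswith s "["))
  PySem.Str.join "\n" (pvCollapse filtered)

-- ===== PRECONDITION & SPEC =====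
def Spec_clean_lyrics (lyrics_text : String) (out : String) : Prop := out = clean_lyrics_alt lyrics_text
instance (lyrics_text : String) (out : String) : Decidable (Spec_clean_lyrics lyrics_text out) := by unfold Spec_clean_lyrics; infer_instance

-- ===== CLAIM (what is proved, stated in full; the proofs are below) =====
def Claim_equal_clean_lyrics : Prop := ∀ (lyrics_text : String), Dom_clean_lyrics lyrics_text → Spec_clean_lyrics lyrics_text (clean_lyrics lyrics_text)

-- ===== LEMMAS AND PROOFS =====

-- recursive characterisation of A's fold; the flag says "the accumulator ends in an empty line"
def pvSpecA (b : Bool) : List String → List String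
  | [] => []
  | l :: ls =>
    if PySem.Str.startswith (PySem.Str.strip l) "[" then pvSpecA b ls
    else if PySem.Str.strip l = "" then
      (if b then pvSpecA true ls else "" :: pvSpecA true ls)
    else PySem.Str.strip l :: pvSpecA false ls

def pvF (ls : List String) : List String :=
  (ls.map PySem.Str.strip).filter (fun s => !(PySem.Str.startswith s "["))

lemma pvFoldA_eq (ls : List String) : ∀ acc : List String,
    ls.foldl pvStepA acc = acc ++ pvSpecA (acc.getLast? == some "") ls := by
  induction ls with
  | nil => intro acc; simp [pvSpecA]
  | cons l ls ih =>
    intro acc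
    rw [List.foldl_cons, ih]
    by_cases hb : PySem.Chars.startswith (PySem.Chars.strip l.toList) ['['] = true
    · simp [pvStepA, pvSpecA, hb]
    · by_cases he : PySem.Str.strip l = ""
      · by_cases hl : acc.getLast? = some ""
        · simp [pvStepA, pvSpecA, he, hl]
        · have h0 : PySem.Chars.startswith [] ['['] = false := by decide
          simp [pvStepA, pvSpecA, he, hl, h0, List.getLast?_append]
      · have hbe : (PySem.Str.strip l == "") = false := by simp [he]
        simp [pvStepA, pvSpecA, hb, he, hbe, List.getLast?_append]

lemma pvSpecA_eq (ls : List String) :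
    pvSpecA false ls = pvCollapse (pvF ls) ∧
    pvSpecA true ls = pvCollapse ((pvF ls).dropWhile (· = "")) := by
  induction ls with
  | nil => simp [pvSpecA, pvF, pvCollapse]
  | cons l ls ih =>
    obtain ⟨ih1, ih2⟩ := ih
    simp only [pvSpecA, pvF, List.map_cons, List.filter_cons]
    generalize PySem.Str.strip l = s
    by_cases hb : PySem.Chars.startswith s.toList ['['] = true
    · constructor <;> simp [pvF, hb, ih1, ih2]
    · by_cases he : s = ""
      · subst he
        have h0 : PySem.Chars.startswith [] ['['] = false := by decide
        constructor <;> simp [pvF, ih2, pvCollapse, h0]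
      · constructor <;> simp [pvF, hb, he, ih1, pvCollapse]

-- ===== VERDICT (by name: the statement is the Claim_ definition above) =====
theorem clean_lyrics_spec : Claim_equal_clean_lyrics := by
  intro t _
  show clean_lyrics t = clean_lyrics_alt t
  unfold clean_lyrics clean_lyrics_alt
  simp only [pvFoldA_eq]
  simp [(pvSpecA_eq _).1, pvF]
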